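-- pv_equiv track=rewrite | github.com/bahar-hub/pandas-retrive-testgen | src/fetch.py | parse_numpy_sections
-- ===== SOURCE A (Python) =====
-- def parse_numpy_sections(doc: str) -> dict:
--     """
--     Split a NumPy-style docstring into sections:
--         Parameters / Returns / Raises / Notes / Examples
--     """
--     out = {k: "" for k in ("Parameters", "Returns", "Raises", "Notes", "Examples")}
--     if not doc:
--         return out
--
--     lines = doc.splitlines()
--     headers = ["Parameters", "Returns", "Raises", "Notes", "Examples"]
--     marks = []
--
--     # Locate header lines
--     for i, ln in enumerate(lines):
--         if ln.strip() in headers: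
--             marks.append((ln.strip(), i))
--
--     marks.sort(key=lambda x: x[1])
--
--     # Extract blocks between headers
--     for idx, (name, i) in enumerate(marks):
--         start = i + 1
--         # Skip underlines (e.g., "---")
--         if start < len(lines) and set(lines[start].strip()) <= {"-"}:
--             start += 1
--         end = marks[idx + 1][1] if idx + 1 < len(marks) else len(lines)
--         out[name] = "\n".join(lines[start:end]).strip("\n")
--
--     # Remove accidental "Examples" leakage inside "Notes"
--     if "Examples" in out["Notes"]:
--         out["Notes"] = out["Notes"].split("Examples", 1)[0].rstrip()
--
--     return out
-- ===== SOURCE B (Python) =====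
-- def parse_numpy_sections(doc: str) -> dict:
--     # Single forward pass with a state machine (current section + line buffer)
--     # instead of collecting header marks and slicing between them.
--     headers = ("Parameters", "Returns", "Raises", "Notes", "Examples")
--     out = {k: "" for k in headers}
--     current, buf, skip = None, [], False
--     for ln in doc.splitlines():
--         s = ln.strip()
--         if s in headers:
--             if current is not None:
--                 out[current] = "\n".join(buf).strip("\n")
--             current, buf, skip = s, [], True
--         elif skip and all(c == "-" for c in s):
--             skip = False
--         else:
--             buf.append(ln)
--             skip = False
--     if current is not None:
--         out[current] = "\n".join(buf).strip("\n")
--     if "Examples" in out["Notes"]: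
--         out["Notes"] = out["Notes"].split("Examples", 1)[0].rstrip()
--     return out
-- ===== Notes on version B (the rewrite author's own statement) =====
-- stated objective: alternative
-- what changed: Replaces the collect-header-marks / sort / slice-between-marks two-phase algorithm with a single forward state-machine pass keeping the current section name and a line buffer that is flushed at each header and at the end.
import Mathlib
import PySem

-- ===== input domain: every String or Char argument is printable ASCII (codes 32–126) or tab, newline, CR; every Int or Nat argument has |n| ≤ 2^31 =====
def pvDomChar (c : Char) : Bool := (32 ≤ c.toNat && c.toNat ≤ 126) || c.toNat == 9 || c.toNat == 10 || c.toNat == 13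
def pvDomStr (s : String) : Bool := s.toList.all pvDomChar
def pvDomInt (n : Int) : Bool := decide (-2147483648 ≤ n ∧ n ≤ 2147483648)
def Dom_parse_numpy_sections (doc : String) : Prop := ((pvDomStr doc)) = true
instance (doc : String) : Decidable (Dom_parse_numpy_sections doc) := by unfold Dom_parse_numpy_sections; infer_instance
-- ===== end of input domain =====

-- B is a single forward state-machine pass over the lines (current section + buffer flushed at
-- each header and at the end) instead of A's collect-marks / sort / slice-between-marks phases.

-- helpers shared by both ports (both Pythons contain these very expressions)
def pvHeaders : List String := ["Parameters", "Returns", "Raises", "Notes", "Examples"]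

-- set(s) <= {"-"} in A / all(c == "-" for c in s) in B: every character is '-'
def pvDashy (s : String) : Bool := s.toList.all (fun c => c == '-')

-- "\n".join(buf).strip("\n")
def pvJoinStrip (buf : List String) : String :=
  PySem.Str.stripChars (PySem.Str.join "\n" buf) "\n"

-- out = {k: "" for k in headers}
def pvInit : PySem.Dict String String :=
  pvHeaders.foldl (fun d k => d.insert k "") PySem.Dict.empty

-- the common trailer: the Notes/"Examples" leakage cleanup, then the returned dict (as items).
-- out["Notes"] is ported with getD: the key is always present in out.
def pvFinish (out : PySem.Dict String String) : List (String × String) :=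
  let notes := out.getD "Notes" ""
  if PySem.Str.isIn "Examples" notes then
    -- out["Notes"].split("Examples", 1)[0].rstrip(): split is total (sep ≠ "") and returns ≥ 1 piece
    (out.insert "Notes" (PySem.Str.rstrip
        (((PySem.Str.splitMax? notes "Examples" 1).getD []).headD ""))).items
  else out.items

-- ===== PORT A =====
-- start = i + 1; skip an underline ("---" or blank) line
def pvStart (lines : List String) (i : Int) : Int :=
  if i + 1 < (lines.length : Int) ∧
      pvDashy (PySem.Str.strip (PySem.List.pyGetD lines (i + 1) "")) = true
  then i + 2 else i + 1

-- "\n".join(lines[start:end]).strip("\n")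
def pvBlock (lines : List String) (i e : Int) : String :=
  pvJoinStrip (PySem.List.slice lines (some (pvStart lines i)) (some e))

-- body of A's per-mark loop: q = (idx, (name, i)); end = marks[idx+1][1] or len(lines)
def pvABody (lines : List String) (marks : List (String × Int))
    (out : PySem.Dict String String) (q : Int × String × Int) : PySem.Dict String String :=
  out.insert q.2.1 (pvBlock lines q.2.2
    (if q.1 + 1 < (marks.length : Int)
     then (PySem.List.pyGetD marks (q.1 + 1) ("", 0)).2
     else (lines.length : Int)))

def parse_numpy_sections (doc : String) : List (String × String) :=
  if doc == "" then pvInit.items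
  else
    let lines := PySem.Str.splitlines doc
    let marks : List (String × Int) :=
      (PySem.List.enumerate lines).foldl
        (fun acc p =>
          if pvHeaders.contains (PySem.Str.strip p.2) then acc ++ [(PySem.Str.strip p.2, p.1)]
          else acc) []
    let marks := PySem.List.sorted marks (fun x => x.2)
    pvFinish ((PySem.List.enumerate marks).foldl (pvABody lines marks) pvInit)

-- ===== PORT B =====
-- flush the buffer into the current section (if any)
def pvFlush (out : PySem.Dict String String) (cur : Option String) (buf : List String) :
    PySem.Dict String String :=
  match cur with
  | none => out
  | some c => out.insert c (pvJoinStrip buf)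

-- one step of B's state machine; state = (out, current, buf, skip)
def pvStep (st : PySem.Dict String String × Option String × List String × Bool) (ln : String) :
    PySem.Dict String String × Option String × List String × Bool :=
  match st with
  | (out, cur, buf, skip) =>
    if pvHeaders.contains (PySem.Str.strip ln) then
      (pvFlush out cur buf, some (PySem.Str.strip ln), [], true)
    else if skip && pvDashy (PySem.Str.strip ln) then (out, cur, buf, false)
    else (out, cur, buf ++ [ln], false)

def parse_numpy_sections_alt (doc : String) : List (String × String) :=
  let st := (PySem.Str.splitlines doc).foldl pvStep (pvInit, none, [], false)
  pvFinish (pvFlush st.1 st.2.1 st.2.2.1)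

-- ===== PRECONDITION & SPEC =====
def Spec_parse_numpy_sections (doc : String) (out : List (String × String)) : Prop := out = parse_numpy_sections_alt doc
instance (doc : String) (out : List (String × String)) : Decidable (Spec_parse_numpy_sections doc out) := by unfold Spec_parse_numpy_sections; infer_instance

-- ===== CLAIM (what is proved, stated in full; the proofs are below) =====
def Claim_equal_parse_numpy_sections : Prop := ∀ (doc : String), Dom_parse_numpy_sections doc → Spec_parse_numpy_sections doc (parse_numpy_sections doc)

-- ===== LEMMAS AND PROOFS =====

-- proof-side vocabulary ---------------------------------------------------

def pvIns (d : PySem.Dict String String) (p : String × String) : PySem.Dict String String :=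
  d.insert p.1 p.2

-- [(c, flushed buf)] when a section is open
def pvFlushL (cur : Option String) (buf : List String) : List (String × String) :=
  match cur with
  | none => []
  | some c => [(c, pvJoinStrip buf)]

-- the sequence of (section, text) pairs B's state machine flushes
def pvFseq (cur : Option String) (buf : List String) (skip : Bool) :
    List String → List (String × String)
  | [] => pvFlushL cur buf
  | ln :: rest =>
    if pvHeaders.contains (PySem.Str.strip ln) then
      pvFlushL cur buf ++ pvFseq (some (PySem.Str.strip ln)) [] true rest
    else if skip && pvDashy (PySem.Str.strip ln) then pvFseq cur buf false rest
    else pvFseq cur (buf ++ [ln]) false rest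

-- header marks with Nat indices, defined structurally
def pvMarksN : List String → List (String × Nat)
  | [] => []
  | ln :: rest =>
    if pvHeaders.contains (PySem.Str.strip ln) then
      (PySem.Str.strip ln, 0) :: (pvMarksN rest).map (fun p => (p.1, p.2 + 1))
    else (pvMarksN rest).map (fun p => (p.1, p.2 + 1))

def pvToI (p : String × Nat) : String × Int := (p.1, (p.2 : Int))

def pvStartN (lines : List String) (i : Nat) : Nat :=
  if i + 1 < lines.length ∧ pvDashy (PySem.Str.strip (lines.getD (i + 1) "")) = true
  then i + 2 else i + 1

def pvBlockN (lines : List String) (i e : Nat) : String :=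
  pvJoinStrip ((lines.drop (pvStartN lines i)).take (e - pvStartN lines i))

-- the (section, text) pairs A's slicing produces, over Nat marks
def pvSegs (lines : List String) : List (String × Nat) → List (String × String)
  | [] => []
  | (n, i) :: rest =>
    (n, pvBlockN lines i (match rest with | [] => lines.length | (_, j) :: _ => j)) ::
      pvSegs lines rest

def pvNotHdr (ln : String) : Bool := !pvHeaders.contains (PySem.Str.strip ln)

-- drop the underline line, if any
def pvDD (skip : Bool) (lines : List String) : List String :=
  match skip, lines with
  | true, d :: t => if pvDashy (PySem.Str.strip d) then t else d :: t
  | _, _ => lines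

theorem pvMarksEq (lines : List String) : ∀ (k : Nat),
    ((PySem.List.enumerate lines (k : Int)).filter
        (fun p => pvHeaders.contains (PySem.Str.strip p.2))).map
      (fun p => (PySem.Str.strip p.2, p.1))
    = (pvMarksN lines).map (fun q => (q.1, ((q.2 + k : Nat) : Int))) := by
  induction lines with
  | nil => intro k; simp [PySem.List.enumerate, pvMarksN]
  | cons ln rest ih =>
    intro k
    have hc : PySem.List.enumerate (ln :: rest) (k : Int)
        = ((k : Int), ln) :: PySem.List.enumerate rest ((k : Int) + 1) := rfl
    rw [hc]
    have hk1 : ((k : Int) + 1) = ((k + 1 : Nat) : Int) := by push_cast; ring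
    by_cases h : pvHeaders.contains (PySem.Str.strip ln) = true
    · simp only [List.filter_cons, h, List.map_cons, pvMarksN, if_true]
      rw [hk1, ih (k + 1)]
      simp only [List.map_map]
      congr 1
      · simp
      · apply List.map_congr_left; intro q _
        simp only [Function.comp]
        congr 1
        omega
    · simp only [List.filter_cons, h, pvMarksN, Bool.false_eq_true, if_false]
      rw [hk1, ih (k + 1)]
      simp only [List.map_map]
      apply List.map_congr_left; intro q _
      simp only [Function.comp]
      congr 1
      omega

theorem pvMarksPairwise (lines : List String) :
    List.Pairwise (fun a b => a.2 < b.2) (pvMarksN lines) := by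
  induction lines with
  | nil => simp [pvMarksN]
  | cons ln rest ih =>
    have hm : List.Pairwise (fun (a b : String × Nat) => a.2 < b.2)
        ((pvMarksN rest).map (fun p => (p.1, p.2 + 1))) := by
      rw [List.pairwise_map]
      exact ih.imp (by intro a b h; simpa using h)
    unfold pvMarksN
    split
    · refine List.Pairwise.cons ?_ hm
      intro b hb
      rcases List.mem_map.1 hb with ⟨p, _, rfl⟩
      simp
    · exact hm

theorem pvSortedId (lines : List String) :
    PySem.List.sorted ((pvMarksN lines).map pvToI) (fun x => x.2) = (pvMarksN lines).map pvToI := by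
  apply PySem.List.sorted_eq_of_perm_of_pairwise_lt _ _ _ (List.Perm.refl _)
  rw [List.pairwise_map]
  exact (pvMarksPairwise lines).imp (by intro a b h; simpa [pvToI] using h)

theorem pvBlockCast (lines : List String) (i e : Nat) :
    pvBlock lines (i : Int) (e : Int) = pvBlockN lines i e := by
  unfold pvBlock pvStart pvBlockN pvStartN
  have h1 : ((i : Int) + 1) = ((i + 1 : Nat) : Int) := by push_cast; ring
  have h2 : ((i : Int) + 2) = ((i + 2 : Nat) : Int) := by push_cast; ring
  rw [h1, PySem.List.pyGetD_natCast]
  simp only [Nat.cast_lt]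
  split_ifs with hc
  · rw [h2, PySem.List.slice_natCast]
  · rw [PySem.List.slice_natCast]

theorem pvALoop (lines : List String) (ms : List (String × Nat)) :
    ∀ (rest : List (String × Nat)) (k : Nat) (out : PySem.Dict String String),
      ms.drop k = rest →
      (PySem.List.enumerate (rest.map pvToI) (k : Int)).foldl
          (pvABody lines (ms.map pvToI)) out
        = (pvSegs lines rest).foldl pvIns out := by
  intro rest
  induction rest with
  | nil => intro k out _; simp [pvSegs]
  | cons hd rest' ih =>
    intro k out hdrop
    obtain ⟨n, i⟩ := hd
    have hk : k < ms.length := by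
      by_contra hk
      rw [List.drop_eq_nil_of_le (by omega)] at hdrop
      exact (List.cons_ne_nil _ _) hdrop.symm
    have hlen : ms.length = k + (rest'.length + 1) := by
      have := congrArg List.length hdrop
      simp [List.length_drop] at this
      omega
    have hdrop' : ms.drop (k + 1) = rest' := by
      have h : ms.drop (k + 1) = (ms.drop k).drop 1 := by rw [List.drop_drop]
      rw [h, hdrop]; rfl
    have hcons : PySem.List.enumerate (((n, i) :: rest').map pvToI) (k : Int)
        = ((k : Int), pvToI (n, i)) :: PySem.List.enumerate (rest'.map pvToI) ((k : Int) + 1) := rfl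
    rw [hcons]
    simp only [List.foldl_cons]
    have hk1 : ((k : Int) + 1) = ((k + 1 : Nat) : Int) := by push_cast; ring
    cases rest' with
    | nil =>
      simp only [List.length_nil] at hlen
      have hguard : ¬ ((k : Int) + 1 < (((ms.map pvToI)).length : Int)) := by
        simp only [List.length_map]
        omega
      have hbody : pvABody lines (ms.map pvToI) out ((k : Int), pvToI (n, i))
          = pvIns out (n, pvBlockN lines i lines.length) := by
        show out.insert n (pvBlock lines (i : Int)
            (if (k : Int) + 1 < (((ms.map pvToI)).length : Int)
             then (PySem.List.pyGetD (ms.map pvToI) ((k : Int) + 1) ("", 0)).2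
             else (lines.length : Int))) = out.insert n (pvBlockN lines i lines.length)
        rw [if_neg hguard, pvBlockCast]
      rw [hbody, hk1, ih (k + 1) _ hdrop']
      simp [pvSegs]
    | cons q r =>
      obtain ⟨m, j⟩ := q
      simp only [List.length_cons] at hlen
      have hguard : ((k : Int) + 1 < (((ms.map pvToI)).length : Int)) := by
        simp only [List.length_map]
        omega
      have hget : (ms.map pvToI).getD (k + 1) ("", 0) = pvToI (m, j) := by
        have h0 : (ms.map pvToI).drop (k + 1) = pvToI (m, j) :: r.map pvToI := by
          rw [← List.map_drop, hdrop']; rfl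
        have h1 : (ms.map pvToI)[k + 1]? = some (pvToI (m, j)) := by
          have h2 : (List.drop (k + 1) (ms.map pvToI))[0]? = (ms.map pvToI)[k + 1 + 0]? :=
            List.getElem?_drop
          simp only [h0] at h2
          simpa using h2.symm
        simp [List.getD_eq_getElem?_getD, h1]
      have hbody : pvABody lines (ms.map pvToI) out ((k : Int), pvToI (n, i))
          = pvIns out (n, pvBlockN lines i j) := by
        show out.insert n (pvBlock lines (i : Int)
            (if (k : Int) + 1 < (((ms.map pvToI)).length : Int)
             then (PySem.List.pyGetD (ms.map pvToI) ((k : Int) + 1) ("", 0)).2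
             else (lines.length : Int))) = out.insert n (pvBlockN lines i j)
        rw [if_pos hguard, hk1, PySem.List.pyGetD_natCast, hget]
        show out.insert n (pvBlock lines (i : Int) ((j : Nat) : Int)) = _
        rw [pvBlockCast]
      rw [hbody, hk1, ih (k + 1) _ hdrop']
      simp [pvSegs]

theorem pvMarksN_cons (ln : String) (rest : List String) :
    pvMarksN (ln :: rest)
      = if pvHeaders.contains (PySem.Str.strip ln) then
          (PySem.Str.strip ln, 0) :: (pvMarksN rest).map (fun p => (p.1, p.2 + 1))
        else (pvMarksN rest).map (fun p => (p.1, p.2 + 1)) := by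
  simp [pvMarksN]

theorem pvHdrNotDashy (s : String) (h : pvHeaders.contains s = true) : pvDashy s = false := by
  simp [pvHeaders, List.contains_eq_mem] at h
  rcases h with h|h|h|h|h <;> subst h <;> decide

-- ===== B loop =====

theorem pvBLoop (L : List String) :
    ∀ (out : PySem.Dict String String) (cur : Option String) (buf : List String) (skip : Bool),
      pvFlush (L.foldl pvStep (out, cur, buf, skip)).1 (L.foldl pvStep (out, cur, buf, skip)).2.1
          (L.foldl pvStep (out, cur, buf, skip)).2.2.1
        = (pvFseq cur buf skip L).foldl pvIns out := by
  induction L with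
  | nil =>
    intro out cur buf skip
    cases cur <;> simp [pvFseq, pvFlushL, pvFlush, pvIns]
  | cons ln rest ih =>
    intro out cur buf skip
    simp only [List.foldl_cons, pvFseq, pvStep]
    by_cases h : pvHeaders.contains (PySem.Str.strip ln) = true
    · rw [if_pos h, if_pos h, List.foldl_append, ih]
      congr 1
      cases cur <;> simp [pvFlushL, pvFlush, pvIns]
    · rw [if_neg h, if_neg h]
      by_cases hs : (skip && pvDashy (PySem.Str.strip ln)) = true
      · rw [if_pos hs, if_pos hs, ih]
      · rw [if_neg hs, if_neg hs, ih]

theorem pvFseqNone (L : List String) :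
    ∀ (buf : List String) (skip : Bool), pvFseq none buf skip L = pvFseq none [] false L := by
  induction L with
  | nil => intro buf skip; rfl
  | cons ln rest ih =>
    intro buf skip
    simp only [pvFseq]
    by_cases h : pvHeaders.contains (PySem.Str.strip ln) = true
    · rw [if_pos h, if_pos h]; rfl
    · rw [if_neg h, if_neg h]
      by_cases hs : (skip && pvDashy (PySem.Str.strip ln)) = true
      · rw [if_pos hs, Bool.false_and, if_neg (by simp), ih buf false]
        exact (ih _ false).symm
      · rw [if_neg hs, Bool.false_and, if_neg (by simp), ih (buf ++ [ln]) false]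
        exact (ih _ false).symm

theorem pvFseqSome (L : List String) :
    ∀ (c : String) (buf : List String) (skip : Bool),
      pvFseq (some c) buf skip L
        = (c, pvJoinStrip (buf ++ (pvDD skip L).takeWhile pvNotHdr)) ::
            pvFseq none [] false ((pvDD skip L).dropWhile pvNotHdr) := by
  induction L with
  | nil =>
    intro c buf skip
    cases skip <;> simp [pvFseq, pvFlushL, pvDD]
  | cons ln rest ih =>
    intro c buf skip
    by_cases h : pvHeaders.contains (PySem.Str.strip ln) = true
    · have hdd : pvDD skip (ln :: rest) = ln :: rest := by
        cases skip <;> simp [pvDD, pvHdrNotDashy _ h]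
      have hnh : pvNotHdr ln = false := by unfold pvNotHdr; rw [h]; rfl
      rw [hdd, List.takeWhile_cons_of_neg (by simp [hnh]),
          List.dropWhile_cons_of_neg (by simp [hnh])]
      simp only [pvFseq, if_pos h, List.append_nil]
      rfl
    · have hc : pvHeaders.contains (PySem.Str.strip ln) = false := Bool.eq_false_iff.2 h
      have hnh : pvNotHdr ln = true := by unfold pvNotHdr; rw [hc]; rfl
      by_cases hs : skip = true ∧ pvDashy (PySem.Str.strip ln) = true
      · obtain ⟨hsk, hda⟩ := hs
        subst hsk
        have hdd : pvDD true (ln :: rest) = rest := by simp [pvDD, hda]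
        rw [hdd]
        simp only [pvFseq, if_neg h, hda, Bool.true_and, if_true]
        rw [ih c buf false]
        rfl
      · have hda : pvDashy (PySem.Str.strip ln) = false ∨ skip = false := by
          cases skip
          · exact Or.inr rfl
          · exact Or.inl (Bool.eq_false_iff.2 (fun hda => hs ⟨rfl, hda⟩))
        have hs' : (skip && pvDashy (PySem.Str.strip ln)) = false := by
          rcases hda with hda | hda
          · rw [hda, Bool.and_false]
          · rw [hda, Bool.false_and]
        have hdd : pvDD skip (ln :: rest) = ln :: rest := by
          cases skip
          · rfl
          · rcases hda with hda | hda
            · simp [pvDD, hda]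
            · exact absurd hda (by simp)
        rw [hdd, List.takeWhile_cons_of_pos (by simp [hnh]),
            List.dropWhile_cons_of_pos (by simp [hnh])]
        simp only [pvFseq, if_neg h, hs', Bool.false_eq_true, if_false]
        rw [ih c (buf ++ [ln]) false]
        have : pvDD false rest = rest := rfl
        rw [this]
        simp

theorem pvFirstIdx (xs : List String) :
    (match (pvMarksN xs).head? with
     | none => xs.length
     | some (_, j) => j) = (xs.takeWhile pvNotHdr).length := by
  induction xs with
  | nil => rfl
  | cons ln rest ih =>
    by_cases h : pvHeaders.contains (PySem.Str.strip ln) = true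
    · have hnh : pvNotHdr ln = false := by unfold pvNotHdr; rw [h]; rfl
      have hm : pvMarksN (ln :: rest)
          = (PySem.Str.strip ln, 0) :: (pvMarksN rest).map (fun p => (p.1, p.2 + 1)) := by
        rw [pvMarksN_cons, if_pos h]
      rw [List.takeWhile_cons_of_neg (by simp [hnh]), hm]
      rfl
    · have hc : pvHeaders.contains (PySem.Str.strip ln) = false := Bool.eq_false_iff.2 h
      have hnh : pvNotHdr ln = true := by unfold pvNotHdr; rw [hc]; rfl
      rw [List.takeWhile_cons_of_pos (by simp [hnh])]
      simp only [pvMarksN, if_neg h, List.length_cons]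
      rw [← ih]
      cases hm : (pvMarksN rest).head? with
      | none => simp [hm]
      | some q => obtain ⟨m, j⟩ := q; simp [hm]

theorem pvStartShift (x : String) (xs : List String) (i : Nat) :
    pvStartN (x :: xs) (i + 1) = pvStartN xs i + 1 := by
  unfold pvStartN
  have hg : (x :: xs).getD (i + 1 + 1) "" = xs.getD (i + 1) "" := rfl
  have hl : (i + 1 + 1 < (x :: xs).length) ↔ (i + 1 < xs.length) := by
    simp [List.length_cons]
  rw [hg]
  by_cases h : i + 1 < xs.length ∧ pvDashy (PySem.Str.strip (xs.getD (i + 1) "")) = true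
  · rw [if_pos h, if_pos ⟨hl.2 h.1, h.2⟩]
  · rw [if_neg h, if_neg (by rw [hl]; exact h)]

theorem pvBlockShift (x : String) (xs : List String) (i e : Nat) :
    pvBlockN (x :: xs) (i + 1) (e + 1) = pvBlockN xs i e := by
  unfold pvBlockN
  rw [pvStartShift]
  have h1 : (x :: xs).drop (pvStartN xs i + 1) = xs.drop (pvStartN xs i) := rfl
  rw [h1, Nat.succ_sub_succ]

theorem pvSegs_cons (lines : List String) (n : String) (i : Nat) (rest : List (String × Nat)) :
    pvSegs lines ((n, i) :: rest)
      = (n, pvBlockN lines i (match rest with | [] => lines.length | (_, j) :: _ => j)) ::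
          pvSegs lines rest := by
  simp [pvSegs]

theorem pvSegsShift (x : String) (xs : List String) (ms : List (String × Nat)) :
    pvSegs (x :: xs) (ms.map (fun p => (p.1, p.2 + 1))) = pvSegs xs ms := by
  induction ms with
  | nil => rfl
  | cons hd rest ih =>
    obtain ⟨n, i⟩ := hd
    have e' : (match rest.map (fun p => (p.1, p.2 + 1)) with
        | [] => (x :: xs).length | (_, j) :: _ => j)
        = (match rest with | [] => xs.length | (_, j) :: _ => j) + 1 := by
      cases rest with
      | nil => simp
      | cons q r => obtain ⟨m, j⟩ := q; simp
    rw [List.map_cons, pvSegs_cons, pvSegs_cons, e', pvBlockShift, ih]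

theorem pvSegsDropWhile (xs : List String) :
    pvSegs xs (pvMarksN xs)
      = pvSegs (xs.dropWhile pvNotHdr) (pvMarksN (xs.dropWhile pvNotHdr)) := by
  induction xs with
  | nil => rfl
  | cons ln rest ih =>
    by_cases h : pvHeaders.contains (PySem.Str.strip ln) = true
    · have hnh : pvNotHdr ln = false := by unfold pvNotHdr; rw [h]; rfl
      rw [List.dropWhile_cons_of_neg (by simp [hnh])]
    · have hc : pvHeaders.contains (PySem.Str.strip ln) = false := Bool.eq_false_iff.2 h
      have hnh : pvNotHdr ln = true := by unfold pvNotHdr; rw [hc]; rfl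
      rw [List.dropWhile_cons_of_pos (by simp [hnh])]
      rw [← ih]
      show pvSegs (ln :: rest) (pvMarksN (ln :: rest)) = pvSegs rest (pvMarksN rest)
      simp only [pvMarksN, if_neg h]
      exact pvSegsShift ln rest (pvMarksN rest)

theorem pvTakeTakeWhile (p : String → Bool) (xs : List String) :
    xs.take ((xs.takeWhile p).length) = xs.takeWhile p := by
  induction xs with
  | nil => rfl
  | cons x t ih =>
    by_cases h : p x = true
    · rw [List.takeWhile_cons_of_pos h, List.length_cons, List.take_succ_cons, ih]
    · rw [List.takeWhile_cons_of_neg (by simp [h]), List.length_nil, List.take_zero]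

theorem pvCruxAux : ∀ (n : Nat) (L : List String), L.length ≤ n →
    pvSegs L (pvMarksN L) = pvFseq none [] false L := by
  intro n
  induction n with
  | zero =>
    intro L hL
    have : L = [] := List.eq_nil_of_length_eq_zero (Nat.le_zero.1 hL)
    subst this; rfl
  | succ n ih =>
    intro L hL
    cases L with
    | nil => rfl
    | cons ln rest =>
      have hr : rest.length ≤ n := by simpa using hL
      by_cases h : pvHeaders.contains (PySem.Str.strip ln) = true
      · -- header line
        have hms : pvMarksN (ln :: rest)
            = (PySem.Str.strip ln, 0) :: (pvMarksN rest).map (fun p => (p.1, p.2 + 1)) := by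
          rw [pvMarksN_cons, if_pos h]
        rw [hms]
        have hrhs : pvFseq none [] false (ln :: rest)
            = pvFseq (some (PySem.Str.strip ln)) [] true rest := by
          simp only [pvFseq]
          rw [if_pos h]
          rfl
        rw [hrhs, pvFseqSome, pvSegs_cons]
        have htail : pvSegs (ln :: rest) ((pvMarksN rest).map (fun p => (p.1, p.2 + 1)))
            = pvFseq none [] false ((pvDD true rest).dropWhile pvNotHdr) := by
          have hdw : (pvDD true rest).dropWhile pvNotHdr = rest.dropWhile pvNotHdr := by
            cases rest with
            | nil => rfl
            | cons d t =>
              by_cases hd : pvDashy (PySem.Str.strip d) = true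
              · have hnh : pvNotHdr d = true := by
                  cases hcc : pvHeaders.contains (PySem.Str.strip d)
                  · unfold pvNotHdr; rw [hcc]; rfl
                  · rw [pvHdrNotDashy _ hcc] at hd; exact absurd hd (by simp)
                simp [pvDD, hd, List.dropWhile_cons_of_pos hnh]
              · simp [pvDD, hd]
          rw [pvSegsShift, pvSegsDropWhile, hdw]
          exact ih _ (le_trans (List.length_dropWhile_le _ _) hr)
        have he : (match (pvMarksN rest).map (fun p => (p.1, p.2 + 1)) with
             | [] => (ln :: rest).length | (_, j) :: _ => j)
            = (rest.takeWhile pvNotHdr).length + 1 := by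
          rw [← pvFirstIdx rest]
          cases hm : pvMarksN rest with
          | nil => simp [List.length_cons]
          | cons q r => obtain ⟨m, j⟩ := q; simp
        have hval : pvBlockN (ln :: rest) 0 ((rest.takeWhile pvNotHdr).length + 1)
            = pvJoinStrip ((pvDD true rest).takeWhile pvNotHdr) := by
          cases rest with
          | nil => rfl
          | cons d t =>
            unfold pvBlockN pvStartN
            by_cases hd : pvDashy (PySem.Str.strip d) = true
            · have hnh : pvNotHdr d = true := by
                cases hcc : pvHeaders.contains (PySem.Str.strip d)
                · unfold pvNotHdr; rw [hcc]; rfl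
                · rw [pvHdrNotDashy _ hcc] at hd; exact absurd hd (by simp)
              rw [if_pos (And.intro (by simp) (by exact hd))]
              have hdd : pvDD true (d :: t) = t := by simp [pvDD, hd]
              rw [hdd, List.takeWhile_cons_of_pos hnh]
              have hdrop : (ln :: d :: t).drop (0 + 2) = t := rfl
              rw [hdrop]
              simp only [List.length_cons]
              have harith : (t.takeWhile pvNotHdr).length + 1 + 1 - (0 + 2)
                  = (t.takeWhile pvNotHdr).length := by omega
              rw [harith, pvTakeTakeWhile]
            · rw [if_neg (by intro hc; exact hd (by exact hc.2))]
              have hdd : pvDD true (d :: t) = d :: t := by simp [pvDD, hd]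
              rw [hdd]
              have hdrop : (ln :: d :: t).drop (0 + 1) = d :: t := rfl
              rw [hdrop]
              have harith : ((d :: t).takeWhile pvNotHdr).length + 1 - (0 + 1)
                  = ((d :: t).takeWhile pvNotHdr).length := by omega
              rw [harith, pvTakeTakeWhile]
        rw [he, hval, htail]
        simp
      · -- non-header line
        have hms : pvMarksN (ln :: rest) = (pvMarksN rest).map (fun p => (p.1, p.2 + 1)) := by
          rw [pvMarksN_cons, if_neg h]
        rw [hms, pvSegsShift]
        have hrhs : pvFseq none [] false (ln :: rest) = pvFseq none [ln] false rest := by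
          simp only [pvFseq]
          rw [if_neg h, Bool.false_and, if_neg (by simp : ¬ (false = true))]
          rfl
        rw [hrhs, pvFseqNone]
        exact ih rest hr

theorem pvCrux (L : List String) : pvSegs L (pvMarksN L) = pvFseq none [] false L :=
  pvCruxAux L.length L (Nat.le_refl _)

-- A's mark collection at offset 0, in pvToI form
theorem pvMarksEq0 (lines : List String) :
    ((PySem.List.enumerate lines).filter
        (fun p => pvHeaders.contains (PySem.Str.strip p.2))).map
      (fun p => (PySem.Str.strip p.2, p.1))
    = (pvMarksN lines).map pvToI := by
  have h := pvMarksEq lines 0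
  simpa [pvToI] using h

-- A's per-mark loop over the whole marks list
theorem pvALoop0 (lines : List String) (ms : List (String × Nat)) :
    (PySem.List.enumerate (ms.map pvToI)).foldl (pvABody lines (ms.map pvToI)) pvInit
      = (pvSegs lines ms).foldl pvIns pvInit := by
  have h := pvALoop lines ms ms 0 pvInit List.drop_zero
  simpa using h

-- ===== VERDICT (by name: the statement is the Claim_ definition above) =====
theorem parse_numpy_sections_spec : Claim_equal_parse_numpy_sections := by
  intro doc _
  unfold Spec_parse_numpy_sections
  by_cases hd : doc = ""
  · subst hd
    decide
  · unfold parse_numpy_sections parse_numpy_sections_alt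
    rw [if_neg (by simpa using hd)]
    simp only []
    rw [PySem.List.foldl_append_if]
    rw [List.nil_append, pvMarksEq0, pvSortedId, pvALoop0, pvCrux, ← pvBLoop]
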